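-- pv_equiv track=rewrite | github.com/chrisumartinez/interview_problems | bigram_frequency_analyzer.py | bigram_frequency_analyzer
-- ===== SOURCE A (Python) =====
-- def bigram_frequency_analyzer(text):
--
--     #Break down the text into individual words:
--     words = text.split()
--     wordMap = {}
--     output = ""
--
--
--     #Create the dictionary for each two words, initalize right now to an empty hashmap:
--     for index in range(len(words) - 1):
--
--         #check edge case: if list is out of range
--         if index >= len(words) - 2:
--             break
--
--         wordMap_key = words[index] + " " + words[index + 1]
--         if wordMap_key not in wordMap:
--             occurences = {}
--             wordMap[wordMap_key] = occurences
--
--     #now lets look for occurences within each word: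
--     for index in range(len(words)-1):
--
--         #check edge case: if list is out of range:
--         if index >= len(words)-2:
--             break
--
--         #grab key:
--         wordMap_key = words[index] + " " + words[index + 1]
--         #grab word following the key:
--         occurence_key = words[index + 2]
--
--         #if the word is not found in key -> value: hashMap:
--         if occurence_key not in wordMap[wordMap_key]:
--             wordMap[wordMap_key][occurence_key] = 1
--         else:
--             wordMap[wordMap_key][occurence_key] += 1
--
--     #Clean up output:
--     for key in wordMap.keys():
--         output += key + " : "
--         for occurence_key in wordMap[key].keys():
--             output += occurence_key + " "
--             output +=  "("  + str(wordMap[key][occurence_key]) + ")" + " "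
--         output +=  "\n"
--
--
--     return output
-- ===== SOURCE B (Python) =====
-- def bigram_frequency_analyzer(text):
--     # Dict-free alternative: list the (bigram, follower) pairs once, then group by
--     # scanning: dedup keys in first-appearance order, filter followers per key,
--     # dedup followers and count occurrences with list.count.
--     words = text.split()
--     pairs = [(words[i] + " " + words[i + 1], words[i + 2])
--              for i in range(len(words) - 2)]
--     out = ""
--     seen_keys = []
--     for key, _ in pairs:
--         if key in seen_keys:
--             continue
--         seen_keys.append(key)
--         followers = [w for k, w in pairs if k == key]
--         line = key + " : "
--         seen_words = []
--         for w in followers: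
--             if w not in seen_words:
--                 seen_words.append(w)
--                 line += w + " (" + str(followers.count(w)) + ") "
--         out += line + "\n"
--     return out
-- ===== Notes on version B (the rewrite author's own statement) =====
-- stated objective: alternative
-- what changed: A incrementally builds a nested dict-of-dicts in two index loops and then formats it by walking the dicts; B uses no dictionaries at all: it materialises the (bigram, follower) pair list once and produces each output line by group-by-scanning: dedup keys in first-appearance order, filter the followers of each key, dedup them and count with list.count.
import Mathlib
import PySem

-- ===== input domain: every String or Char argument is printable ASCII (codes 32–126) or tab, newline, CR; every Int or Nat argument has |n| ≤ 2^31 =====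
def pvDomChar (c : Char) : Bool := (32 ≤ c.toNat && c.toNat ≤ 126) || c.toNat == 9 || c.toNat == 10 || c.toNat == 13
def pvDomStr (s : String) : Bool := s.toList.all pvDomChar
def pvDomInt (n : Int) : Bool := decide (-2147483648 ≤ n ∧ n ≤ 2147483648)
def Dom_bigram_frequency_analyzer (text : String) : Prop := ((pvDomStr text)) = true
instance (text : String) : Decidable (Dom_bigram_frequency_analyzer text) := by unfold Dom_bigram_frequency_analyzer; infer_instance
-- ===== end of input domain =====

-- B is a dict-free alternative: it lists the (bigram, follower) pairs once and groups them
-- by scanning (dedup keys in first-appearance order, filter + count followers per key),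
-- where A builds a nested dict-of-dicts in two index loops; objective: alternative (same result).

-- ===== PORT A =====
abbrev BfaInner := PySem.Dict (List Char) Int
abbrev BfaMap := PySem.Dict (List Char) BfaInner

-- words[index] + " " + words[index + 1]  (indices are guarded by the break, so pyGet? is always some; getD [] never fires)
def bfaKey (words : List (List Char)) (i : Int) : List Char :=
  (PySem.List.pyGet? words i).getD [] ++ [' '] ++ (PySem.List.pyGet? words (i + 1)).getD []

-- first for-loop of A, with its break transliterated as early return
def bfaLoop1 (words : List (List Char)) (n : Int) : List Int → BfaMap → BfaMap
  | [], m => m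
  | i :: rest, m =>
    if i ≥ n - 2 then m
    else
      let key := bfaKey words i
      bfaLoop1 words n rest (if !(m.contains key) then m.insert key PySem.Dict.empty else m)

-- second for-loop of A
def bfaLoop2 (words : List (List Char)) (n : Int) : List Int → BfaMap → BfaMap
  | [], m => m
  | i :: rest, m =>
    if i ≥ n - 2 then m
    else
      let key := bfaKey words i
      let ok := (PySem.List.pyGet? words (i + 2)).getD []
      let inner := m.getD key PySem.Dict.empty
      let inner' := if !(inner.contains ok) then inner.insert ok 1
                    else inner.insert ok (inner.getD ok 0 + 1)
      bfaLoop2 words n rest (m.insert key inner')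

-- A's output loop: string += over keys, with repeated dict lookups
def bfaOut (m : BfaMap) : List Char :=
  m.keys.foldl (fun out k =>
    let out := out ++ k ++ [' ', ':', ' ']
    let inner := m.getD k PySem.Dict.empty
    let out := inner.keys.foldl (fun o ok =>
      (o ++ ok ++ [' ']) ++ ('(' :: PySem.Int.toChars (inner.getD ok 0) ++ [')'] ++ [' '])) out
    out ++ ['\n']) []

def bigram_frequency_analyzer (text : String) : String :=
  let words := PySem.Chars.split₀ text.toList
  let n : Int := words.length
  let m := bfaLoop1 words n (PySem.List.pyRange 0 (n - 1)) PySem.Dict.empty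
  let m := bfaLoop2 words n (PySem.List.pyRange 0 (n - 1)) m
  String.mk (bfaOut m)

-- ===== PORT B =====
-- pairs = [(words[i] + " " + words[i+1], words[i+2]) for i in range(len(words) - 2)]
def bfbPairs (words : List (List Char)) : List (List Char × List Char) :=
  (PySem.List.pyRange 0 ((words.length : Int) - 2)).map (fun i =>
    ((PySem.List.pyGet? words i).getD [] ++ [' '] ++ (PySem.List.pyGet? words (i + 1)).getD [],
     (PySem.List.pyGet? words (i + 2)).getD []))

-- one output line: filter the followers of `key`, dedup them in order, count with list.count
def bfbLine (pairs : List (List Char × List Char)) (key : List Char) : List Char :=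
  let followers := (pairs.filter (fun q => q.1 == key)).map (fun q => q.2)
  let r := followers.foldl (fun (acc : List (List Char) × List Char) w =>
    if acc.1.contains w then acc
    else (acc.1 ++ [w],
          acc.2 ++ (w ++ [' ', '('] ++ PySem.Int.toChars ((followers.count w : Nat) : Int) ++ [')', ' '])))
    ([], key ++ [' ', ':', ' '])
  r.2 ++ ['\n']

def bigram_frequency_analyzer_alt (text : String) : String :=
  let words := PySem.Chars.split₀ text.toList
  let pairs := bfbPairs words
  let r := pairs.foldl (fun (acc : List (List Char) × List Char) p =>
    if acc.1.contains p.1 then acc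
    else (acc.1 ++ [p.1], acc.2 ++ bfbLine pairs p.1)) ([], [])
  String.mk r.2

-- ===== PRECONDITION & SPEC =====
def Spec_bigram_frequency_analyzer (text : String) (out : String) : Prop := out = bigram_frequency_analyzer_alt text
instance (text : String) (out : String) : Decidable (Spec_bigram_frequency_analyzer text out) := by unfold Spec_bigram_frequency_analyzer; infer_instance

-- ===== CLAIM (what is proved, stated in full; the proofs are below) =====
def Claim_equal_bigram_frequency_analyzer : Prop := ∀ (text : String), Dom_bigram_frequency_analyzer text → Spec_bigram_frequency_analyzer text (bigram_frequency_analyzer text)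

-- ===== LEMMAS AND PROOFS =====

def bfaTrips (words : List (List Char)) : List (List Char × List Char × List Char) :=
  words.zip ((words.drop 1).zip (words.drop 2))

def bfaKf (t : List Char × List Char × List Char) : List Char := t.1 ++ [' '] ++ t.2.1

def bfaPairsOf (words : List (List Char)) : List (List Char × List Char) :=
  (bfaTrips words).map (fun t => (bfaKf t, t.2.2))

-- the two passes of A, as folds over the trigram list
def bfaStep1 (m : BfaMap) (t : List Char × List Char × List Char) : BfaMap :=
  if !(m.contains (bfaKf t)) then m.insert (bfaKf t) PySem.Dict.empty else m

def bfaStep2 (m : BfaMap) (t : List Char × List Char × List Char) : BfaMap :=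
  let inner := m.getD (bfaKf t) PySem.Dict.empty
  m.insert (bfaKf t)
    (if !(inner.contains t.2.2) then inner.insert t.2.2 1
     else inner.insert t.2.2 (inner.getD t.2.2 0 + 1))

-- the two passes fused into one step over (key, follower) pairs
def bfaCStep (m : BfaMap) (p : List Char × List Char) : BfaMap :=
  m.insert p.1 ((m.getD p.1 PySem.Dict.empty).insert p.2 ((m.getD p.1 PySem.Dict.empty).getD p.2 0 + 1))

lemma bfaTrips_length (words : List (List Char)) : (bfaTrips words).length = words.length - 2 := by
  simp [bfaTrips]; omega

lemma bfaTrips_getElem (words : List (List Char)) (k : Nat) (h : k + 2 < words.length) :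
    (bfaTrips words)[k]'(by rw [bfaTrips_length]; omega) =
      (words[k]'(by omega), words[k+1]'(by omega), words[k+2]'(by omega)) := by
  simp [bfaTrips, List.getElem_zip, List.getElem_drop]
  congr 1
  omega

lemma bfaKey_eq (words : List (List Char)) (k : Nat) (h : k + 2 < words.length) :
    bfaKey words (k : Int) = bfaKf ((bfaTrips words)[k]'(by rw [bfaTrips_length]; omega)) := by
  have h1 : ((k : Int) + 1) = ((k + 1 : Nat) : Int) := by push_cast; ring
  rw [bfaKey, bfaTrips_getElem words k h, h1, PySem.List.pyGet?_natCast, PySem.List.pyGet?_natCast]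
  simp [bfaKf, List.getElem?_eq_getElem, h, (by omega : k < words.length), (by omega : k + 1 < words.length)]

lemma bfaLoop1_stop (words : List (List Char)) (k : Nat) (m : BfaMap)
    (h : words.length ≤ k + 2) :
    bfaLoop1 words (words.length : Int) (PySem.List.pyRange (k : Int) ((words.length : Int) - 1)) m = m := by
  by_cases hlt : (k : Int) < (words.length : Int) - 1
  · rw [PySem.List.pyRange_one_cons hlt]
    have hge : ((k : Int) ≥ (words.length : Int) - 2) := by push_cast; omega
    simp [bfaLoop1, hge]
  · rw [PySem.List.pyRange_one_eq_nil (by omega)]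
    rfl

lemma bfaLoop2_stop (words : List (List Char)) (k : Nat) (m : BfaMap)
    (h : words.length ≤ k + 2) :
    bfaLoop2 words (words.length : Int) (PySem.List.pyRange (k : Int) ((words.length : Int) - 1)) m = m := by
  by_cases hlt : (k : Int) < (words.length : Int) - 1
  · rw [PySem.List.pyRange_one_cons hlt]
    have hge : ((k : Int) ≥ (words.length : Int) - 2) := by push_cast; omega
    simp [bfaLoop2, hge]
  · rw [PySem.List.pyRange_one_eq_nil (by omega)]
    rfl

lemma bfaLoop1_eq (words : List (List Char)) (d : Nat) : ∀ (k : Nat) (m : BfaMap),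
    words.length ≤ 2 + k + d →
    bfaLoop1 words (words.length : Int) (PySem.List.pyRange (k : Int) ((words.length : Int) - 1)) m
      = ((bfaTrips words).drop k).foldl bfaStep1 m := by
  induction d with
  | zero =>
    intro k m hle
    rw [List.drop_eq_nil_of_le (by rw [bfaTrips_length]; omega)]
    exact bfaLoop1_stop words k m (by omega)
  | succ d ih =>
    intro k m hle
    by_cases hbig : words.length ≤ k + 2
    · rw [List.drop_eq_nil_of_le (by rw [bfaTrips_length]; omega)]
      exact bfaLoop1_stop words k m hbig
    · have hk2 : k + 2 < words.length := by omega
      have hkt : k < (bfaTrips words).length := by rw [bfaTrips_length]; omega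
      have hlt : (k : Int) < (words.length : Int) - 1 := by push_cast; omega
      have hng : ¬ ((k : Int) ≥ (words.length : Int) - 2) := by push_cast; omega
      rw [PySem.List.pyRange_one_cons hlt, List.drop_eq_getElem_cons hkt, List.foldl_cons]
      have hc : ((k : Int) + 1) = ((k + 1 : Nat) : Int) := by push_cast; ring
      rw [bfaLoop1, if_neg hng, bfaKey_eq words k hk2, hc, ih (k + 1) _ (by omega)]
      rfl

lemma bfaLoop2_eq (words : List (List Char)) (d : Nat) : ∀ (k : Nat) (m : BfaMap),
    words.length ≤ 2 + k + d →
    bfaLoop2 words (words.length : Int) (PySem.List.pyRange (k : Int) ((words.length : Int) - 1)) m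
      = ((bfaTrips words).drop k).foldl bfaStep2 m := by
  induction d with
  | zero =>
    intro k m hle
    rw [List.drop_eq_nil_of_le (by rw [bfaTrips_length]; omega)]
    exact bfaLoop2_stop words k m (by omega)
  | succ d ih =>
    intro k m hle
    by_cases hbig : words.length ≤ k + 2
    · rw [List.drop_eq_nil_of_le (by rw [bfaTrips_length]; omega)]
      exact bfaLoop2_stop words k m hbig
    · have hk2 : k + 2 < words.length := by omega
      have hkt : k < (bfaTrips words).length := by rw [bfaTrips_length]; omega
      have hlt : (k : Int) < (words.length : Int) - 1 := by push_cast; omega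
      have hng : ¬ ((k : Int) ≥ (words.length : Int) - 2) := by push_cast; omega
      rw [PySem.List.pyRange_one_cons hlt, List.drop_eq_getElem_cons hkt, List.foldl_cons]
      have hc1 : ((k : Int) + 1) = ((k + 1 : Nat) : Int) := by push_cast; ring
      have hc2 : ((k : Int) + 2) = ((k + 2 : Nat) : Int) := by push_cast; ring
      rw [bfaLoop2, if_neg hng, bfaKey_eq words k hk2, hc2, PySem.List.pyGet?_natCast,
        List.getElem?_eq_getElem hk2, hc1, ih (k + 1) _ (by omega)]
      have : (bfaTrips words)[k]'hkt =
          (words[k]'(by omega), words[k+1]'(by omega), words[k+2]'(by omega)) :=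
        bfaTrips_getElem words k hk2
      simp only [bfaStep2, this, Option.getD_some]

lemma bfaInsert_insert_comm_of_contains (d : BfaMap) (k k' : List Char) (v w : BfaInner)
    (hc : d.contains k = true) (hne : k' ≠ k) :
    (d.insert k v).insert k' w = (d.insert k' w).insert k v := by
  apply PySem.Dict.ext
  by_cases hck' : d.contains k' = true
  · have h1 : (d.insert k v).contains k' = true := by
      rw [PySem.Dict.contains_insert]; simp [hck']
    have h2 : (d.insert k' w).contains k = true := by
      rw [PySem.Dict.contains_insert]; simp [hc]
    rw [PySem.Dict.items_insert_of_contains _ _ h1, PySem.Dict.items_insert_of_contains _ _ hc,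
      PySem.Dict.items_insert_of_contains _ _ h2, PySem.Dict.items_insert_of_contains _ _ hck',
      List.map_map, List.map_map]
    apply List.map_congr_left
    intro p _
    by_cases hpk : p.1 = k <;> by_cases hpk' : p.1 = k' <;>
      simp [Function.comp, hpk, hpk', hne, Ne.symm hne] <;> simp_all
  · have hck'' : d.contains k' = false := by simpa using hck'
    have h1 : (d.insert k v).contains k' = false := by
      rw [PySem.Dict.contains_insert]; simp [hck'', hne]
    have h2 : (d.insert k' w).contains k = true := by
      rw [PySem.Dict.contains_insert]; simp [hc]
    rw [PySem.Dict.items_insert_of_not_contains _ _ h1, PySem.Dict.items_insert_of_contains _ _ hc,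
      PySem.Dict.items_insert_of_contains _ _ h2, PySem.Dict.items_insert_of_not_contains _ _ hck'',
      List.map_append]
    simp
    exact fun h => absurd h hne

lemma bfaContains_step1 (m : BfaMap) (t : List Char × List Char × List Char) (k : List Char)
    (h : m.contains k = true) : (bfaStep1 m t).contains k = true := by
  rw [bfaStep1]
  split
  · rw [PySem.Dict.contains_insert]; simp [h]
  · exact h

lemma bfaContains_step1_self (m : BfaMap) (t : List Char × List Char × List Char) :
    (bfaStep1 m t).contains (bfaKf t) = true := by
  by_cases hc : m.contains (bfaKf t) = true
  · simp [bfaStep1, hc]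
  · simp [bfaStep1, hc, PySem.Dict.contains_insert_self]

def bfaVal (m : BfaMap) (t : List Char × List Char × List Char) : BfaInner :=
  if !((m.getD (bfaKf t) PySem.Dict.empty).contains t.2.2) then
    (m.getD (bfaKf t) PySem.Dict.empty).insert t.2.2 1
  else
    (m.getD (bfaKf t) PySem.Dict.empty).insert t.2.2
      ((m.getD (bfaKf t) PySem.Dict.empty).getD t.2.2 0 + 1)

lemma bfaStep2_eq_insert (m : BfaMap) (t : List Char × List Char × List Char) :
    bfaStep2 m t = m.insert (bfaKf t) (bfaVal m t) := rfl

lemma bfaStep_comm (m : BfaMap) (t u : List Char × List Char × List Char)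
    (h : m.contains (bfaKf t) = true) :
    bfaStep1 (bfaStep2 m t) u = bfaStep2 (bfaStep1 m u) t := by
  by_cases hk : bfaKf u = bfaKf t
  · have h1 : (bfaStep2 m t).contains (bfaKf u) = true := by
      rw [hk]; simp [bfaStep2, PySem.Dict.contains_insert]
    have hcu : m.contains (bfaKf u) = true := by rw [hk]; exact h
    simp [bfaStep1, h1, hcu]
  · by_cases hcu : m.contains (bfaKf u) = true
    · have h1 : (bfaStep2 m t).contains (bfaKf u) = true := by
        simp [bfaStep2, PySem.Dict.contains_insert, hcu]
      simp [bfaStep1, h1, hcu]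
    · have hcu' : m.contains (bfaKf u) = false := by simpa using hcu
      have hstep1 : bfaStep1 m u = m.insert (bfaKf u) PySem.Dict.empty := by
        simp [bfaStep1, hcu']
      have h1 : (bfaStep2 m t).contains (bfaKf u) = false := by
        rw [bfaStep2_eq_insert, PySem.Dict.contains_insert]
        simp [hcu', hk]
      have hval : bfaVal (m.insert (bfaKf u) PySem.Dict.empty) t = bfaVal m t := by
        simp only [bfaVal, PySem.Dict.getD_insert_of_ne _ _ _ (Ne.symm hk)]
      calc bfaStep1 (bfaStep2 m t) u
          = (bfaStep2 m t).insert (bfaKf u) PySem.Dict.empty := by simp [bfaStep1, h1]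
        _ = (m.insert (bfaKf t) (bfaVal m t)).insert (bfaKf u) PySem.Dict.empty := by
              rw [bfaStep2_eq_insert]
        _ = (m.insert (bfaKf u) PySem.Dict.empty).insert (bfaKf t) (bfaVal m t) :=
              bfaInsert_insert_comm_of_contains m _ _ _ _ h hk
        _ = bfaStep2 (bfaStep1 m u) t := by
              rw [hstep1, bfaStep2_eq_insert, hval]

lemma bfaSwap_fold (l : List (List Char × List Char × List Char)) (m : BfaMap)
    (t : List Char × List Char × List Char) (h : m.contains (bfaKf t) = true) :
    bfaStep2 (l.foldl bfaStep1 m) t = l.foldl bfaStep1 (bfaStep2 m t) := by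
  induction l generalizing m with
  | nil => rfl
  | cons u l' ih =>
    rw [List.foldl_cons, List.foldl_cons, ih _ (bfaContains_step1 m u _ h),
      bfaStep_comm m t u h]

-- the fused step equals step1 followed by step2
lemma bfaCStep_eq (m : BfaMap) (t : List Char × List Char × List Char) :
    bfaCStep m (bfaKf t, t.2.2) = bfaStep2 (bfaStep1 m t) t := by
  simp only [bfaCStep, bfaStep2, bfaStep1]
  by_cases hc : m.contains (bfaKf t) = true
  · simp only [hc, Bool.not_true, Bool.false_eq_true, if_false]
    by_cases hok : (m.getD (bfaKf t) PySem.Dict.empty).contains t.2.2 = true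
    · simp [hok]
    · have hok' : (m.getD (bfaKf t) PySem.Dict.empty).contains t.2.2 = false := by
        simpa using hok
      simp [hok', PySem.Dict.getD_of_not_contains _ _ hok']
  · have hc' : m.contains (bfaKf t) = false := by simpa using hc
    simp [hc', PySem.Dict.getD_of_not_contains _ _ hc', PySem.Dict.getD_insert_self,
      PySem.Dict.contains_empty, PySem.Dict.getD_empty, PySem.Dict.insert_insert_self]

lemma bfaTwoPass_eq (ts : List (List Char × List Char × List Char)) (m : BfaMap) :
    ts.foldl bfaStep2 (ts.foldl bfaStep1 m) = (ts.map (fun t => (bfaKf t, t.2.2))).foldl bfaCStep m := by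
  induction ts generalizing m with
  | nil => rfl
  | cons t rest ih =>
    rw [List.map_cons, List.foldl_cons, List.foldl_cons, List.foldl_cons,
      bfaSwap_fold rest (bfaStep1 m t) t (bfaContains_step1_self m t),
      ih, bfaCStep_eq]

-- keys of the fused fold: first-appearance dedup of the key list
lemma bfaKeys_fold (ps : List (List Char × List Char)) (d : BfaMap) :
    (ps.foldl bfaCStep d).keys = PySem.Set.update d.keys (ps.map (fun p => p.1)) := by
  simpa [bfaCStep] using PySem.Dict.keys_foldl_insert_key ps (fun p => p.1)
    (fun d p => (d.getD p.1 PySem.Dict.empty).insert p.2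
      ((d.getD p.1 PySem.Dict.empty).getD p.2 0 + 1)) d

-- each inner dict of the fused fold is the counter of the followers of its key
lemma bfaGetD_fold (ps : List (List Char × List Char)) (k : List Char) :
    (ps.foldl bfaCStep PySem.Dict.empty).getD k PySem.Dict.empty
      = PySem.Dict.counter ((ps.filter (fun q => q.1 == k)).map (fun q => q.2)) := by
  induction ps using List.reverseRecOn with
  | nil =>
    rw [← PySem.Dict.foldl_insert_getD_add_one_eq_counter]
    simp [PySem.Dict.getD_empty]
  | append_singleton ps p ih =>
    rw [List.foldl_append, List.foldl_cons, List.foldl_nil, List.filter_append, List.map_append]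
    by_cases hk : k = p.1
    · subst hk
      simp only [bfaCStep, PySem.Dict.getD_insert_self, ih]
      rw [← PySem.Dict.foldl_insert_getD_add_one_eq_counter,
        ← PySem.Dict.foldl_insert_getD_add_one_eq_counter, List.foldl_append]
      simp
    · have hfk : (p.1 == k) = false := by simpa using Ne.symm hk
      simp [bfaCStep, PySem.Dict.getD_insert_of_ne _ _ _ hk, ih, hfk]

-- the dedup-accumulator loop (shared shape of B's outer and inner loops)
lemma bfaSet_prefix (s : List (List Char)) (l : List (List Char)) :
    s <+: PySem.Set.update s l := by
  induction l generalizing s with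
  | nil => exact List.prefix_refl s
  | cons x l ih =>
    have h1 : PySem.Set.update s (x :: l) = PySem.Set.update (PySem.Set.add s x) l := by
      simp [PySem.Set.update]
    have h2 : s <+: PySem.Set.add s x := by
      by_cases hx : x ∈ s
      · have : PySem.Set.add s x = s := by simp [PySem.Set.add, hx]
        rw [this]
      · have : PySem.Set.add s x = s ++ [x] := by simp [PySem.Set.add, hx]
        rw [this]
        exact List.prefix_append s [x]
    exact h1 ▸ h2.trans (ih (PySem.Set.add s x))

lemma bfaDedupFold (l : List (List Char)) (g : List Char → List Char) :
    ∀ (s : List (List Char)) (o : List Char),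
    l.foldl (fun (acc : List (List Char) × List Char) x =>
        if acc.1.contains x then acc else (acc.1 ++ [x], acc.2 ++ g x)) (s, o)
      = (PySem.Set.update s l, o ++ ((PySem.Set.update s l).drop s.length).flatMap g) := by
  induction l with
  | nil => intro s o; simp [PySem.Set.update]
  | cons x l ih =>
    intro s o
    have hupd : PySem.Set.update s (x :: l) = PySem.Set.update (PySem.Set.add s x) l := by
      simp [PySem.Set.update]
    rw [List.foldl_cons]
    by_cases hx : x ∈ s
    · have hc : s.contains x = true := List.contains_iff_mem.mpr hx
      have hadd : PySem.Set.add s x = s := by simp [PySem.Set.add, hx]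
      simp only [hc, if_true]
      rw [ih s o, hupd, hadd]
    · have hc' : s.contains x = false := by simpa using hx
      have hadd : PySem.Set.add s x = s ++ [x] := by simp [PySem.Set.add, hx]
      simp only [hc', Bool.false_eq_true, if_false]
      rw [ih (s ++ [x]) (o ++ g x), hupd, hadd]
      obtain ⟨rest, hrest⟩ := bfaSet_prefix (s ++ [x]) l
      rw [← hrest, List.drop_left]
      have h2 : ((s ++ [x]) ++ rest).drop s.length = x :: rest := by
        rw [List.append_assoc]
        simpa using (List.drop_left (l₁ := s) (l₂ := [x] ++ rest))
      rw [h2]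
      simp

-- A's formatting loop as a flatMap over the keys
lemma bfaOut_eq (m : BfaMap) :
    bfaOut m = m.keys.flatMap (fun k =>
      k ++ [' ', ':', ' '] ++
      (m.getD k PySem.Dict.empty).keys.flatMap (fun ok =>
        ok ++ [' ', '('] ++ PySem.Int.toChars ((m.getD k PySem.Dict.empty).getD ok 0) ++ [')', ' ']) ++
      ['\n']) := by
  unfold bfaOut
  have hinner : ∀ (inner : BfaInner) (o : List Char),
      inner.keys.foldl (fun o ok =>
        (o ++ ok ++ [' ']) ++ ('(' :: PySem.Int.toChars (inner.getD ok 0) ++ [')'] ++ [' '])) o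
      = o ++ inner.keys.flatMap (fun ok =>
          ok ++ [' ', '('] ++ PySem.Int.toChars (inner.getD ok 0) ++ [')', ' ']) := by
    intro inner o
    rw [List.foldl_ext _ (fun (o : List Char) ok =>
        o ++ (ok ++ [' ', '('] ++ PySem.Int.toChars (inner.getD ok 0) ++ [')', ' '])) o
      (by intro a b _; simp)]
    exact PySem.List.foldl_append_eq_flatMap _ _ o
  have hstep : ∀ (out k : List Char),
      ((( (m.getD k PySem.Dict.empty).keys.foldl (fun o ok =>
        (o ++ ok ++ [' ']) ++ ('(' :: PySem.Int.toChars ((m.getD k PySem.Dict.empty).getD ok 0) ++ [')'] ++ [' ']))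
        (out ++ k ++ [' ', ':', ' '])) ++ ['\n']))
      = out ++ (k ++ [' ', ':', ' '] ++
          (m.getD k PySem.Dict.empty).keys.flatMap (fun ok =>
            ok ++ [' ', '('] ++ PySem.Int.toChars ((m.getD k PySem.Dict.empty).getD ok 0) ++ [')', ' ']) ++
          ['\n']) := by
    intro out k
    rw [hinner (m.getD k PySem.Dict.empty) (out ++ k ++ [' ', ':', ' '])]
    simp
  rw [List.foldl_ext _ (fun (out k : List Char) =>
      out ++ (k ++ [' ', ':', ' '] ++
        (m.getD k PySem.Dict.empty).keys.flatMap (fun ok =>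
          ok ++ [' ', '('] ++ PySem.Int.toChars ((m.getD k PySem.Dict.empty).getD ok 0) ++ [')', ' ']) ++
        ['\n'])) []
    (by intro a b _; exact hstep a b)]
  exact PySem.List.foldl_append_eq_flatMap _ _ []

-- B's per-line computation, written as a flatMap over the deduped followers
lemma bfbLine_eq (pairs : List (List Char × List Char)) (k : List Char) :
    bfbLine pairs k = k ++ [' ', ':', ' '] ++
      (PySem.Set.ofList ((pairs.filter (fun q => q.1 == k)).map (fun q => q.2))).flatMap
        (fun w => w ++ [' ', '('] ++
          PySem.Int.toChars (((((pairs.filter (fun q => q.1 == k)).map (fun q => q.2)).count w : Nat)) : Int) ++ [')', ' ']) ++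
      ['\n'] := by
  simp only [bfbLine]
  rw [bfaDedupFold]
  simp [PySem.Set.update, PySem.Set.ofList, PySem.Set.empty]

-- B's pair list is the mapped trigram list
lemma bfbPairs_eq (words : List (List Char)) : bfbPairs words = bfaPairsOf words := by
  unfold bfbPairs bfaPairsOf
  by_cases hlen : words.length < 2
  · have h1 : (words.length : Int) - 2 ≤ 0 := by omega
    rw [PySem.List.pyRange_one_eq_nil (by omega)]
    have h2 : bfaTrips words = [] := by
      apply List.eq_nil_of_length_eq_zero
      rw [bfaTrips_length]; omega
    rw [h2]; rfl
  · have h1 : ((words.length : Int) - 2) = ((words.length - 2 : Nat) : Int) := by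
      push_cast; omega
    rw [h1, PySem.List.pyRange_zero_natCast, List.map_map]
    apply List.ext_getElem
    · simp [bfaTrips_length]
    · intro i h1' h2'
      have hi : i < words.length - 2 := by simpa using h1'
      have hi2 : i + 2 < words.length := by omega
      simp only [List.getElem_map, List.getElem_range, Function.comp]
      rw [bfaTrips_getElem words i hi2]
      have c1 : ((i : Int) + 1) = ((i + 1 : Nat) : Int) := by push_cast; ring
      have c2 : ((i : Int) + 2) = ((i + 2 : Nat) : Int) := by push_cast; ring
      rw [c1, c2, PySem.List.pyGet?_natCast, PySem.List.pyGet?_natCast, PySem.List.pyGet?_natCast]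
      simp [bfaKf, List.getElem?_eq_getElem, hi2, (by omega : i < words.length),
        (by omega : i + 1 < words.length)]

-- ===== VERDICT (by name: the statement is the Claim_ definition above) =====
theorem bigram_frequency_analyzer_spec : Claim_equal_bigram_frequency_analyzer := by
  intro text _
  unfold Spec_bigram_frequency_analyzer
  simp only [bigram_frequency_analyzer, bigram_frequency_analyzer_alt]
  congr 1
  have hA1 : bfaLoop1 (PySem.Chars.split₀ text.toList) ((PySem.Chars.split₀ text.toList).length : Int)
      (PySem.List.pyRange 0 (((PySem.Chars.split₀ text.toList).length : Int) - 1)) PySem.Dict.empty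
      = (bfaTrips (PySem.Chars.split₀ text.toList)).foldl bfaStep1 PySem.Dict.empty := by
    simpa using bfaLoop1_eq (PySem.Chars.split₀ text.toList) (PySem.Chars.split₀ text.toList).length 0
      PySem.Dict.empty (by omega)
  have hA2 : ∀ m, bfaLoop2 (PySem.Chars.split₀ text.toList) ((PySem.Chars.split₀ text.toList).length : Int)
      (PySem.List.pyRange 0 (((PySem.Chars.split₀ text.toList).length : Int) - 1)) m
      = (bfaTrips (PySem.Chars.split₀ text.toList)).foldl bfaStep2 m := by
    intro m
    simpa using bfaLoop2_eq (PySem.Chars.split₀ text.toList) (PySem.Chars.split₀ text.toList).length 0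
      m (by omega)
  rw [hA1, hA2, bfaTwoPass_eq]
  have hm : (bfaTrips (PySem.Chars.split₀ text.toList)).map (fun t => (bfaKf t, t.2.2))
      = bfbPairs (PySem.Chars.split₀ text.toList) := by
    rw [bfbPairs_eq]; rfl
  rw [hm]
  generalize bfbPairs (PySem.Chars.split₀ text.toList) = ps
  have hkeys : (ps.foldl bfaCStep PySem.Dict.empty).keys
      = PySem.Set.ofList (ps.map (fun p => p.1)) := by
    rw [bfaKeys_fold]
    simp [PySem.Dict.keys_empty, PySem.Set.update, PySem.Set.ofList, PySem.Set.empty]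
  have hB : (ps.foldl (fun (acc : List (List Char) × List Char) p =>
      if acc.1.contains p.1 then acc else (acc.1 ++ [p.1], acc.2 ++ bfbLine ps p.1)) ([], [])).2
      = (PySem.Set.ofList (ps.map (fun p => p.1))).flatMap (bfbLine ps) := by
    rw [← List.foldl_map (f := fun (p : List Char × List Char) => p.1)
      (g := fun (acc : List (List Char) × List Char) k =>
        if acc.1.contains k then acc else (acc.1 ++ [k], acc.2 ++ bfbLine ps k))]
    rw [bfaDedupFold (ps.map (fun p => p.1)) (bfbLine ps) [] []]
    simp [PySem.Set.update, PySem.Set.ofList, PySem.Set.empty]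
  rw [hB, bfaOut_eq, hkeys, List.flatMap_def, List.flatMap_def]
  congr 1
  apply List.map_congr_left
  intro k _
  rw [bfaGetD_fold ps k, PySem.Dict.keys_counter, bfbLine_eq]
  simp only [PySem.Dict.getD_counter]
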